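-- pv_equiv track=rewrite | github.com/flavius0431/CS-UBB | YEAR1/SEM1/FP/LABORATOR_3/TemaLab3-ex(3,8).py | interva_0_10
-- ===== SOURCE A (Python) =====
-- def interva_0_10(the_list):
--     """
--     Gaseste secventa de lungime  maxima care are toate elementele in intervalul[0,10]
--     :parm the_list : lista de numere in care cautam secventa de lungime maxima
--     :type the_list : list
--     :return: secventa de lungime maxima care are elementele in intervalul [0,10]
--     :rtype: list
--
--     """
--
--     lista_secventa_maxima = []
--     lista_secventa = []
--
--     for el in the_list:
--          if el >=0 and el <=10:
--             lista_secventa.append(el)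
--          else:
--              if(len(lista_secventa) > len(lista_secventa_maxima)):
--                  lista_secventa_maxima = lista_secventa[:]
--              lista_secventa.clear()
--     if(len(lista_secventa) > len(lista_secventa_maxima)):
--         lista_secventa_maxima = lista_secventa[:]
--     return lista_secventa_maxima
-- ===== SOURCE B (Python) =====
-- def interva_0_10(the_list):
--     """Group-then-reduce: collect the maximal runs of elements in [0,10],
--     then return the first longest run (or [] if there is none)."""
--     runs = []
--     i, n = 0, len(the_list)
--     while i < n:
--         if 0 <= the_list[i] <= 10:
--             j = i
--             while j < n and 0 <= the_list[j] <= 10: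
--                 j += 1
--             runs.append(the_list[i:j])
--             i = j
--         else:
--             i += 1
--     return max(runs, key=len, default=[])
-- ===== Notes on version B (the rewrite author's own statement) =====
-- stated objective: alternative
-- what changed: Replaced A's two-accumulator streaming scan with a group-then-reduce shape: collect all maximal in-range runs as slices, then pick the first longest with max(key=len, default=[]).
import Mathlib
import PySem

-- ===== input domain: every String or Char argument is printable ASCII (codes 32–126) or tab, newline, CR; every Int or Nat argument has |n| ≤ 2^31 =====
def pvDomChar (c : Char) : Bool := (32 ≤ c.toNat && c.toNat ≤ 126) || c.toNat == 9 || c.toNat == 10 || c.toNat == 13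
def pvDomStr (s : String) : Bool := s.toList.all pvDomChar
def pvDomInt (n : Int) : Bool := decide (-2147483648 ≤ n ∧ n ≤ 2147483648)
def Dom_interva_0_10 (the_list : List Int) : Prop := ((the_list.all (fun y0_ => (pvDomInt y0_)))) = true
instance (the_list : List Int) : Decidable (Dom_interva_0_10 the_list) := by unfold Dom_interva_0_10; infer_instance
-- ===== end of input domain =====

-- B replaces A's two-accumulator streaming scan by a group-then-reduce decomposition
-- (collect maximal in-range runs, then take the first longest); same value, similar cost.

-- shared predicate: `0 <= el <= 10`
def pvInR (x : Int) : Bool := decide (0 ≤ x ∧ x ≤ 10)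

-- ===== PORT A =====
-- the for-loop over (lista_secventa_maxima, lista_secventa)
def pvLoopA : List Int → List Int → List Int → List Int
  | best, cur, [] => if cur.length > best.length then cur else best
  | best, cur, x :: xs =>
      if pvInR x then pvLoopA best (cur ++ [x]) xs
      else pvLoopA (if cur.length > best.length then cur else best) [] xs

def interva_0_10 (the_list : List Int) : List Int := pvLoopA [] [] the_list

-- ===== PORT B =====
-- the outer while-loop: at an in-range element the inner while-loop advances j past
-- the run (= takeWhile) and appends the slice; at an out-of-range element i += 1
def pvRuns : List Int → List (List Int)
  | [] => []
  | x :: xs =>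
      if pvInR x then (x :: xs.takeWhile pvInR) :: pvRuns (xs.dropWhile pvInR)
      else pvRuns xs
termination_by l => l.length
decreasing_by all_goals simp; try exact xs.length_dropWhile_le pvInR

-- max(runs, key=len, default=[]) : first run of maximal length, [] if no runs
def pvMaxLen (runs : List (List Int)) : List Int :=
  runs.foldl (fun m g => if g.length > m.length then g else m) []

def interva_0_10_alt (the_list : List Int) : List Int := pvMaxLen (pvRuns the_list)

-- ===== PRECONDITION & SPEC =====
def Spec_interva_0_10 (the_list : List Int) (out : List Int) : Prop := out = interva_0_10_alt the_list
instance (the_list : List Int) (out : List Int) : Decidable (Spec_interva_0_10 the_list out) := by unfold Spec_interva_0_10; infer_instance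

-- ===== CLAIM (what is proved, stated in full; the proofs are below) =====
def Claim_equal_interva_0_10 : Prop := ∀ (the_list : List Int), Dom_interva_0_10 the_list → Spec_interva_0_10 the_list (interva_0_10 the_list)

-- ===== LEMMAS AND PROOFS =====

def pvSel (m g : List Int) : List Int := if g.length > m.length then g else m

-- the run list A's loop implicitly builds: the pending run `cur`, extended/closed per element
def pvRunsC : List Int → List Int → List (List Int)
  | cur, [] => [cur]
  | cur, x :: xs => if pvInR x then pvRunsC (cur ++ [x]) xs else cur :: pvRunsC [] xs

theorem pvLoopA_eq_foldl (l : List Int) : ∀ best cur,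
    pvLoopA best cur l = (pvRunsC cur l).foldl pvSel best := by
  induction l with
  | nil => intro best cur; simp [pvLoopA, pvRunsC, pvSel]
  | cons x xs ih =>
      intro best cur
      by_cases h : pvInR x = true <;> simp [pvLoopA, pvRunsC, pvSel, h, ih]

theorem pvSel_nil (m : List Int) : pvSel m [] = m := by simp [pvSel]

theorem pvFoldl_filter_ne_nil (ls : List (List Int)) : ∀ b : List Int,
    ls.foldl pvSel b = (ls.filter (fun g => !g.isEmpty)).foldl pvSel b := by
  induction ls with
  | nil => intro b; rfl
  | cons g gs ih =>
      intro b
      by_cases h : g = []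
      · subst h; simp [List.foldl, pvSel_nil, ih]
      · have : g.isEmpty = false := by simpa [List.isEmpty_iff] using h
        simp [List.foldl, this, ih]

theorem pvRunsC_filter (l : List Int) :
    ((∀ cur : List Int, cur ≠ [] →
        (pvRunsC cur l).filter (fun g => !g.isEmpty)
          = (cur ++ l.takeWhile pvInR) :: pvRuns (l.dropWhile pvInR))
     ∧ (pvRunsC [] l).filter (fun g => !g.isEmpty) = pvRuns l) := by
  induction l with
  | nil =>
      constructor
      · intro cur hcur
        have : cur.isEmpty = false := by simpa [List.isEmpty_iff] using hcur
        simp [pvRunsC, pvRuns.eq_def, this]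
      · simp [pvRunsC, pvRuns.eq_def]
  | cons x xs ih =>
      obtain ⟨ih1, ih0⟩ := ih
      by_cases h : pvInR x = true
      · constructor
        · intro cur hcur
          have := ih1 (cur ++ [x]) (by simp)
          simp [pvRunsC, h, this]
          
        · have := ih1 [x] (by simp)
          rw [pvRuns.eq_def]
          simp [pvRunsC, h, this]
      · constructor
        · intro cur hcur
          have hc : cur.isEmpty = false := by simpa [List.isEmpty_iff] using hcur
          rw [pvRuns.eq_def]
          simp [pvRunsC, h, hc, ih0]
        · rw [pvRuns.eq_def]
          simp [pvRunsC, h, ih0]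

-- ===== VERDICT (by name: the statement is the Claim_ definition above) =====
theorem interva_0_10_spec : Claim_equal_interva_0_10 := by
  intro l _
  unfold Spec_interva_0_10 interva_0_10 interva_0_10_alt pvMaxLen
  rw [pvLoopA_eq_foldl, pvFoldl_filter_ne_nil, (pvRunsC_filter l).2]
  rfl
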